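-- pv_equiv track=rewrite | github.com/TurkishKEBAB/SchedularDeprecatedV1 | course_scheduler/app/utils/schedule_utils.py | count_daily_gaps
-- ===== SOURCE A (Python) =====
-- from typing import Dict, List, Tuple, Any, Optional
--
-- def count_daily_gaps(schedule: List[Tuple[str, int]], day: str) -> int:
--     """
--     Count gaps (free periods between classes) in a single day.
--
--     Args:
--         schedule: List of (day_code, slot) tuples
--         day: Day code to analyze
--
--     Returns:
--         Number of gaps in the day
--     """
--     day_slots = sorted([slot for d, slot in schedule if d == day])
--
--     if len(day_slots) <= 1:
--         return 0
--
--     gaps = 0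
--     for i in range(len(day_slots) - 1):
--         if day_slots[i + 1] - day_slots[i] > 1:
--             gaps += 1
--
--     return gaps
-- ===== SOURCE B (Python) =====
-- def count_daily_gaps(schedule, day):
--     s = {slot for d, slot in schedule if d == day}
--     runs = sum(1 for v in s if v - 1 not in s)
--     return runs - 1 if runs >= 1 else 0
-- ===== Notes on version B (the rewrite author's own statement) =====
-- stated objective: simpler
-- what changed: Replaces the sort-then-adjacent-difference sweep with a set of the day's slots and a count of run starts (values v with v-1 absent): gaps = runs - 1, clamped to 0.
import Mathlib
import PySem

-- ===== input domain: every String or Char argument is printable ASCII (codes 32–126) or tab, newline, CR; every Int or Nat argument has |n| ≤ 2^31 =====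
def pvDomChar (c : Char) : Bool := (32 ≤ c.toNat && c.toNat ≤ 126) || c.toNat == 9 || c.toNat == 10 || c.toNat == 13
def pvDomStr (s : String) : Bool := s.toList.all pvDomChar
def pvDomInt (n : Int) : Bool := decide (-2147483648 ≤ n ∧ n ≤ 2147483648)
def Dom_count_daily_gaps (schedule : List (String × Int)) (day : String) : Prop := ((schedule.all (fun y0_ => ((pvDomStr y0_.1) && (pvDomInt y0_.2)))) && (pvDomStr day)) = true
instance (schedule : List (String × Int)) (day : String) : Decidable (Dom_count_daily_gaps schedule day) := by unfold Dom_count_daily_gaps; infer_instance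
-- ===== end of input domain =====

-- B replaces A's sort + adjacent-difference sweep by a set of the day's slots and a count of
-- run starts (values v with v-1 absent from the set): gaps = runs - 1, clamped to 0 (simpler).

-- ===== PORT A =====
def count_daily_gaps (schedule : List (String × Int)) (day : String) : Int :=
  let day_slots := PySem.List.sorted ((schedule.filter (fun p => p.1 == day)).map (fun p => p.2)) (fun x => x) false
  if day_slots.length ≤ 1 then 0
  else
    (PySem.List.pyRange 0 ((day_slots.length : Int) - 1)).foldl
      (fun gaps i =>
        if PySem.List.pyGetD day_slots (i + 1) 0 - PySem.List.pyGetD day_slots i 0 > 1 then gaps + 1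
        else gaps) 0

-- ===== PORT B =====
def count_daily_gaps_alt (schedule : List (String × Int)) (day : String) : Int :=
  let s : PySem.Set Int := PySem.Set.ofList ((schedule.filter (fun p => p.1 == day)).map (fun p => p.2))
  let runs : Int := ((s.filter (fun v => !(PySem.Set.contains s (v - 1)))).length : Int)
  if 1 ≤ runs then runs - 1 else 0

-- ===== PRECONDITION & SPEC =====
def Spec_count_daily_gaps (schedule : List (String × Int)) (day : String) (out : Int) : Prop := out = count_daily_gaps_alt schedule day
instance (schedule : List (String × Int)) (day : String) (out : Int) : Decidable (Spec_count_daily_gaps schedule day out) := by unfold Spec_count_daily_gaps; infer_instance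

-- ===== CLAIM (what is proved, stated in full; the proofs are below) =====
def Claim_equal_count_daily_gaps : Prop := ∀ (schedule : List (String × Int)) (day : String), Dom_count_daily_gaps schedule day → Spec_count_daily_gaps schedule day (count_daily_gaps schedule day)

-- ===== LEMMAS AND PROOFS =====

/-- Adjacent-gap count of a list: number of adjacent pairs whose difference exceeds 1. -/
def gapsF : List Int → Nat
  | [] => 0
  | [_] => 0
  | a :: b :: t => (if 1 < b - a then 1 else 0) + gapsF (b :: t)

/-- A's index loop, re-expressed over `List.range`, computes `gapsF`. -/
lemma countP_range_getD (ys : List Int) :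
    (List.range (ys.length - 1)).countP
      (fun i => decide (1 < ys.getD (i + 1) 0 - ys.getD i 0)) = gapsF ys := by
  induction ys using gapsF.induct with
  | case1 => simp [gapsF]
  | case2 a => simp [gapsF]
  | case3 a b t ih =>
    rw [show (a :: b :: t).length - 1 = t.length + 1 from by simp, List.range_succ_eq_map,
      List.countP_cons, List.countP_map]
    have hpred : ((fun i => decide (1 < (a :: b :: t).getD (i + 1) 0 - (a :: b :: t).getD i 0)) ∘ Nat.succ)
        = (fun i => decide (1 < (b :: t).getD (i + 1) 0 - (b :: t).getD i 0)) := by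
      funext i
      simp [Function.comp, Nat.succ_eq_add_one]
    rw [hpred]
    rw [show (b :: t).length - 1 = t.length from by simp] at ih
    rw [ih]
    by_cases h : 1 < b - a <;> simp [gapsF, h] <;> omega

/-- For a weakly sorted nonempty list, the number of distinct values `v` with `v-1` absent
    (run starts) is the adjacent-gap count plus one. -/
lemma runs_eq_gapsF (ys : List Int) (hp : ys.Pairwise (· ≤ ·)) (hne : ys ≠ []) :
    (ys.toFinset.filter (fun v => (v - 1) ∉ ys.toFinset)).card = gapsF ys + 1 := by
  induction ys using gapsF.induct with
  | case1 => exact absurd rfl hne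
  | case2 a =>
    simp [gapsF, Finset.filter_singleton, show (a : Int) - 1 ≠ a by omega]
  | case3 a b t ih =>
    have hab : a ≤ b := (List.pairwise_cons.1 hp).1 b (by simp)
    have hp' : (b :: t).Pairwise (· ≤ ·) := (List.pairwise_cons.1 hp).2
    have hbT : ∀ x ∈ b :: t, b ≤ x := by
      intro x hx
      rcases List.mem_cons.1 hx with rfl | hx'
      · exact le_refl x
      · exact (List.pairwise_cons.1 hp').1 x hx'
    by_cases hE : a = b
    · subst hE
      have hset : (a :: a :: t).toFinset = (a :: t).toFinset := by
        simp [List.toFinset_cons]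
      rw [hset]
      have : gapsF (a :: a :: t) = gapsF (a :: t) := by
        simp [gapsF]
      rw [this]
      exact ih hp' (by simp)
    · have hab' : a < b := lt_of_le_of_ne hab hE
      have haT : ∀ x ∈ b :: t, a < x := fun x hx => lt_of_lt_of_le hab' (hbT x hx)
      have haT' : a ∉ (b :: t).toFinset := by
        simp only [List.mem_toFinset]
        intro hx
        exact absurd rfl (ne_of_lt (haT a hx))
      rw [show (a :: b :: t).toFinset = insert a (b :: t).toFinset from by
        simp [List.toFinset_cons]]
      rw [Finset.filter_insert]
      have hPa : (a - 1) ∉ insert a (b :: t).toFinset := by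
        simp only [Finset.mem_insert, List.mem_toFinset]
        push_neg
        refine ⟨by omega, fun hx => ?_⟩
        have := haT _ hx
        omega
      rw [if_pos hPa]
      have hnm : a ∉ (b :: t).toFinset.filter (fun v => (v - 1) ∉ insert a (b :: t).toFinset) :=
        fun h => haT' (Finset.mem_of_mem_filter _ h)
      rw [Finset.card_insert_of_notMem hnm]
      by_cases hb1 : b = a + 1
      · have hiff : ∀ v : Int, v - 1 = a ↔ v = b := by omega
        have hmemQ : b ∈ (b :: t).toFinset.filter (fun v => (v - 1) ∉ (b :: t).toFinset) := by
          refine Finset.mem_filter.2 ⟨by simp, ?_⟩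
          rw [show b - 1 = a by omega]
          exact haT'
        have hfe : (b :: t).toFinset.filter (fun v => (v - 1) ∉ insert a (b :: t).toFinset)
            = ((b :: t).toFinset.filter (fun v => (v - 1) ∉ (b :: t).toFinset)).erase b := by
          ext v
          simp only [Finset.mem_filter, Finset.mem_erase, Finset.mem_insert]
          constructor
          · rintro ⟨hv, hnv⟩
            push_neg at hnv
            exact ⟨fun hvb => hnv.1 ((hiff v).2 hvb), hv, hnv.2⟩
          · rintro ⟨hvb, hv, hnv⟩
            exact ⟨hv, by push_neg; exact ⟨fun h => hvb ((hiff v).1 h), hnv⟩⟩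
        rw [hfe, Finset.card_erase_of_mem hmemQ, ih hp' (by simp)]
        have : gapsF (a :: b :: t) = gapsF (b :: t) := by
          simp [gapsF, show ¬(1 < b - a) by omega]
        rw [this]
        omega
      · have hgap : a + 1 < b := by omega
        have hfe : (b :: t).toFinset.filter (fun v => (v - 1) ∉ insert a (b :: t).toFinset)
            = (b :: t).toFinset.filter (fun v => (v - 1) ∉ (b :: t).toFinset) := by
          apply Finset.filter_congr
          intro v hv
          have hvb : b ≤ v := hbT v (List.mem_toFinset.1 hv)
          simp only [Finset.mem_insert]
          constructor
          · intro h hm; exact h (Or.inr hm)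
          · intro h hm
            rcases hm with hm | hm
            · omega
            · exact h hm
        rw [hfe, ih hp' (by simp)]
        have : gapsF (a :: b :: t) = gapsF (b :: t) + 1 := by
          simp only [gapsF, if_pos (show 1 < b - a by omega)]
          omega
        rw [this]

/-- B's run count equals the Finset run count over the sorted list. -/
lemma alt_runs_eq (slots : List Int) :
    ((PySem.Set.ofList slots).filter
        (fun v => !(PySem.Set.contains (PySem.Set.ofList slots) (v - 1)))).length
      = (slots.toFinset.filter (fun v => (v - 1) ∉ slots.toFinset)).card := by
  have hnd : (PySem.Set.ofList slots).Nodup := PySem.Set.nodup_ofList slots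
  have hcong : ((PySem.Set.ofList slots).filter
        (fun v => !(PySem.Set.contains (PySem.Set.ofList slots) (v - 1))))
      = ((PySem.Set.ofList slots).filter (fun v => decide ((v - 1) ∉ slots.toFinset))) := by
    apply List.filter_congr
    intro v _
    simp [PySem.Set.contains_eq_listContains, PySem.Set.mem_ofList, List.mem_toFinset]
  rw [hcong]
  have hfin : (PySem.Set.ofList slots).toFinset = slots.toFinset := by
    ext v; simp [List.mem_toFinset, PySem.Set.mem_ofList]
  have hndf : ((PySem.Set.ofList slots).filter (fun v => decide ((v - 1) ∉ slots.toFinset))).Nodup :=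
    hnd.filter _
  calc ((PySem.Set.ofList slots).filter (fun v => decide ((v - 1) ∉ slots.toFinset))).length
      = ((PySem.Set.ofList slots).filter (fun v => decide ((v - 1) ∉ slots.toFinset))).toFinset.card := by
        rw [List.card_toFinset, hndf.dedup]
    _ = ((PySem.Set.ofList slots).toFinset.filter (fun v => (v - 1) ∉ slots.toFinset)).card := by
        rw [List.toFinset_filter]
        congr 1
        apply Finset.filter_congr
        intro v _
        simp
    _ = (slots.toFinset.filter (fun v => (v - 1) ∉ slots.toFinset)).card := by rw [hfin]

-- ===== VERDICT (by name: the statement is the Claim_ definition above) =====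
theorem count_daily_gaps_spec : Claim_equal_count_daily_gaps := by
  intro schedule day _
  unfold Spec_count_daily_gaps count_daily_gaps count_daily_gaps_alt
  set slots := (schedule.filter (fun p => p.1 == day)).map (fun p => p.2) with hslots
  set ys := PySem.List.sorted slots (fun x => x) false with hys
  have hperm : ys.Perm slots := PySem.List.sorted_perm slots (fun x => x) false
  have hpw : ys.Pairwise (· ≤ ·) := PySem.List.sorted_pairwise slots (fun x => x)
  by_cases hne : ys = []
  · -- no slots for that day: both sides return 0
    have hsl : slots = [] := by
      have h := hperm.length_eq
      rw [hne] at h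
      exact List.length_eq_zero_iff.1 h.symm
    simp [hne, hsl, PySem.Set.ofList]
  · have hruns : ((PySem.Set.ofList slots).filter
        (fun v => !(PySem.Set.contains (PySem.Set.ofList slots) (v - 1)))).length
        = gapsF ys + 1 := by
      rw [alt_runs_eq, List.toFinset_eq_of_perm slots ys hperm.symm]
      exact runs_eq_gapsF ys hpw hne
    have hrunpos : (1 : Int) ≤ (((PySem.Set.ofList slots).filter
        (fun v => !(PySem.Set.contains (PySem.Set.ofList slots) (v - 1)))).length : Int) := by
      rw [hruns]; exact_mod_cast Nat.le_add_left 1 _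
    rw [if_pos hrunpos, hruns]
    by_cases hlen : ys.length ≤ 1
    · -- a single slot: A returns 0 and runs = 1
      rw [if_pos hlen]
      obtain ⟨x, hx⟩ : ∃ x, ys = [x] := by
        apply List.length_eq_one_iff.mp
        have h0 : 0 < ys.length := List.length_pos_of_ne_nil hne
        omega
      rw [hx]
      simp [gapsF]
    · rw [if_neg hlen]
      have hfun : (fun (gaps : Int) (i : Int) =>
            if PySem.List.pyGetD ys (i + 1) 0 - PySem.List.pyGetD ys i 0 > 1 then gaps + 1 else gaps)
          = (fun (gaps : Int) (i : Int) =>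
            if (fun i : Int => decide (1 < PySem.List.pyGetD ys (i + 1) 0 - PySem.List.pyGetD ys i 0)) i = true
            then gaps + 1 else gaps) := by
        funext g i
        simp
      rw [hfun, PySem.List.foldl_count_if]
      rw [show ((ys.length : Int) - 1) = ((ys.length - 1 : Nat) : Int) from by
        have h0 : 0 < ys.length := List.length_pos_of_ne_nil hne
        omega]
      rw [PySem.List.pyRange_zero_natCast, List.countP_map]
      have hpred2 : ((fun i : Int => decide (1 < PySem.List.pyGetD ys (i + 1) 0 - PySem.List.pyGetD ys i 0))
            ∘ (fun k : Nat => (k : Int)))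
          = fun i : Nat => decide (1 < ys.getD (i + 1) 0 - ys.getD i 0) := by
        funext i
        simp only [Function.comp_apply]
        rw [show ((i : Int) + 1) = ((i + 1 : Nat) : Int) from by push_cast; ring,
          PySem.List.pyGetD_natCast, PySem.List.pyGetD_natCast]
      rw [hpred2, countP_range_getD]
      push_cast
      ring
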